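-- pv_equiv track=rewrite | github.com/Billybar/py-exam | exam2/Q2.py | _recursive_check_pairs
-- ===== SOURCE A (Python) =====
-- def _recursive_check_pairs(current_list):
--     # Base case: If the list is empty, all pairs have been found
--     if not current_list:
--         return True
--
--     # Take the first element as the head
--     head = current_list[0]
--     opposite = -head
--
--     # Find the index of the opposite element in the rest of the list (from index 1 onwards)
--     found_idx = -1
--     for i in range(1, len(current_list)):
--         if current_list[i] == opposite:
--             found_idx = i
--             break
--
--     # If the opposite element is not found, then a pair is missing
--     if found_idx == -1:
--         return False
--     else:
--         # If found, create a new list for the recursive call by excluding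
--         # the head (current_list[0]) and the found opposite element (current_list[found_idx]).
--         # This uses slicing, which creates new list objects for the recursive call,
--         # but avoids building an explicit auxiliary list for storage.
--         new_list_for_recursion = current_list[1:found_idx] + current_list[found_idx+1:]
--         return _recursive_check_pairs(new_list_for_recursion)
-- ===== SOURCE B (Python) =====
-- def _recursive_check_pairs(current_list):
--     # Count each value once; the list pairs into {x, -x} iff every value's
--     # count equals its negation's count and zeros come in even number.
--     counts = {}
--     for x in current_list:
--         counts[x] = counts.get(x, 0) + 1
--     if counts.get(0, 0) % 2 != 0:
--         return False
--     return all(counts.get(-x, 0) == c for x, c in counts.items())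
-- ===== Notes on version B (the rewrite author's own statement) =====
-- stated objective: alternative
-- what changed: Replaces the recursive scan-and-splice pair removal (a linear search plus list slicing per removed pair, worst-case quadratic) with a single counting pass over a dict followed by a check that every value's count equals its negation's count and that zeros are even.
import Mathlib
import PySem

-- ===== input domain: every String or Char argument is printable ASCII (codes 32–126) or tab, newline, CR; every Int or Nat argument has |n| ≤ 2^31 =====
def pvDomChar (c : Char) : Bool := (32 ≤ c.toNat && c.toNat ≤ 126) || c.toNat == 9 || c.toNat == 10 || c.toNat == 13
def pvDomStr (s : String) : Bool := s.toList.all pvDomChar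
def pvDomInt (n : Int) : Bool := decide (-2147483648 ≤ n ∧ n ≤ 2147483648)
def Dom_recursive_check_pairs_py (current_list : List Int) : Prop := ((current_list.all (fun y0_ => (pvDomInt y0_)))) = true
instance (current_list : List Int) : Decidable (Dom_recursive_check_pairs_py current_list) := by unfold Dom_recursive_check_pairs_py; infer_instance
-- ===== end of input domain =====

-- B replaces A's recursive scan-and-splice pair removal by one counting pass over a
-- dict plus a count-symmetry check (a different algorithm of the same observed cost).

-- ===== PORT A =====
-- the Python for-loop over range(1, len) with break: first index (in the tail) holding `opp`
def findOppIdx : List Int → Int → Option Nat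
  | [], _ => none
  | x :: xs, opp => if x == opp then some 0 else (findOppIdx xs opp).map (· + 1)

-- current_list[1:found_idx] + current_list[found_idx+1:] with found_idx = j+1 (index in the
-- full list) is exactly t.take j ++ t.drop (j+1) on the tail t; both slice bounds are in range.
def recursive_check_pairs_py (current_list : List Int) : Bool :=
  match current_list with
  | [] => true
  | head :: t =>
    let opposite := -head
    match findOppIdx t opposite with
    | none => false
    | some j => recursive_check_pairs_py (t.take j ++ t.drop (j + 1))
termination_by current_list.length
decreasing_by simp [List.length_take, List.length_drop]; omega

-- ===== PORT B =====
def recursive_check_pairs_py_alt (current_list : List Int) : Bool :=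
  let counts := current_list.foldl (fun d x => d.insert x (d.getD x 0 + 1)) PySem.Dict.empty
  if PySem.Int.mod (counts.getD 0 0) 2 ≠ 0 then false
  else counts.items.all (fun p => counts.getD (-p.1) 0 == p.2)

-- ===== PRECONDITION & SPEC =====
def Spec_recursive_check_pairs_py (current_list : List Int) (out : Bool) : Prop := out = recursive_check_pairs_py_alt current_list
instance (current_list : List Int) (out : Bool) : Decidable (Spec_recursive_check_pairs_py current_list out) := by unfold Spec_recursive_check_pairs_py; infer_instance

-- ===== CLAIM (what is proved, stated in full; the proofs are below) =====
def Claim_equal_recursive_check_pairs_py : Prop := ∀ (current_list : List Int), Dom_recursive_check_pairs_py current_list → Spec_recursive_check_pairs_py current_list (recursive_check_pairs_py current_list)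

-- ===== LEMMAS AND PROOFS =====

-- the common characterisation: every value occurs as often as its negation, and zeros are even
def PairSpec (l : List Int) : Prop := (∀ x : Int, l.count x = l.count (-x)) ∧ 2 ∣ l.count 0

lemma findOppIdx_none {t : List Int} {o : Int} (h : findOppIdx t o = none) : o ∉ t := by
  induction t with
  | nil => simp
  | cons x xs ih =>
    simp only [findOppIdx] at h
    by_cases hx : (x == o) = true
    · simp [hx] at h
    · rw [if_neg hx, Option.map_eq_none_iff] at h
      have hxo : x ≠ o := by simpa using hx
      simp only [List.mem_cons, not_or]
      exact ⟨fun hh => hxo hh.symm, ih h⟩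

lemma findOppIdx_erase {t : List Int} {o : Int} {j : Nat} (h : findOppIdx t o = some j) :
    t.take j ++ t.drop (j + 1) = t.erase o ∧ o ∈ t := by
  induction t generalizing j with
  | nil => simp [findOppIdx] at h
  | cons x xs ih =>
    simp only [findOppIdx] at h
    by_cases hx : (x == o) = true
    · rw [if_pos hx] at h
      obtain rfl : j = 0 := by simpa using h.symm
      have hx' : x = o := by simpa using hx
      simp [hx']
    · rw [if_neg hx] at h
      rcases Option.map_eq_some_iff.mp h with ⟨j', hj', rfl⟩
      obtain ⟨he, hm⟩ := ih hj'
      refine ⟨?_, by simp [hm]⟩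
      simp [List.take_succ_cons, List.drop_succ_cons, hx, he]

lemma count_cons_erase {h : Int} {t : List Int} (hm : -h ∈ t) (x : Int) :
    (h :: t).count x = (t.erase (-h)).count x + (if x = -h then 1 else 0) + (if x = h then 1 else 0) := by
  have h3 : 0 < t.count (-h) := List.count_pos_iff.mpr hm
  by_cases hx : x = -h
  · subst hx
    rw [List.count_erase_self, List.count_cons]
    simp only [beq_iff_eq]
    split_ifs <;> omega
  · rw [List.count_erase_of_ne hx, List.count_cons]
    simp only [beq_iff_eq, if_neg hx]
    split_ifs <;> omega

lemma count_delta {h : Int} {t : List Int} (hm : -h ∈ t) (x : Int) :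
    (h :: t).count x + (t.erase (-h)).count (-x) = (t.erase (-h)).count x + (h :: t).count (-x) := by
  rw [count_cons_erase hm x, count_cons_erase hm (-x)]
  have e1 : (-x = -h) ↔ (x = h) := by omega
  have e2 : (-x = h) ↔ (x = -h) := by omega
  simp only [e1, e2]
  split_ifs <;> omega

lemma pairSpec_cons {h : Int} {t : List Int} (hm : -h ∈ t) :
    PairSpec (h :: t) ↔ PairSpec (t.erase (-h)) := by
  unfold PairSpec
  have hz2 : (h :: t).count 0 = (t.erase (-h)).count 0 + (if h = 0 then 2 else 0) := by
    rw [count_cons_erase hm 0]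
    split_ifs <;> omega
  constructor
  · rintro ⟨hc, hz⟩
    refine ⟨fun x => ?_, ?_⟩
    · have := count_delta hm x
      have := hc x
      omega
    · split_ifs at hz2 <;> omega
  · rintro ⟨hc, hz⟩
    refine ⟨fun x => ?_, ?_⟩
    · have := count_delta hm x
      have := hc x
      omega
    · split_ifs at hz2 <;> omega

lemma portA_iff_aux : ∀ (n : Nat) (l : List Int), l.length ≤ n →
    (recursive_check_pairs_py l = true ↔ PairSpec l) := by
  intro n
  induction n with
  | zero =>
    intro l hl
    obtain rfl : l = [] := List.eq_nil_of_length_eq_zero (Nat.le_zero.mp hl)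
    simp [recursive_check_pairs_py, PairSpec]
  | succ n ih =>
    intro l hl
    match l with
    | [] => simp [recursive_check_pairs_py, PairSpec]
    | h :: t =>
      rw [recursive_check_pairs_py]
      cases hf : findOppIdx t (-h) with
      | none =>
        show false = true ↔ PairSpec (h :: t)
        have hnm : -h ∉ t := findOppIdx_none hf
        constructor
        · intro hx; simp at hx
        · rintro ⟨hc, hz⟩
          exfalso
          by_cases h0 : h = 0
          · subst h0
            have hone : (0 :: t).count 0 = 1 := by
              rw [List.count_cons, List.count_eq_zero.mpr (by simpa using hnm)]
              simp
            rw [hone] at hz; omega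
          · have hch := hc h
            have h1 : (h :: t).count h = t.count h + 1 := by simp
            have h2 : (h :: t).count (-h) = 0 := by
              rw [List.count_cons, List.count_eq_zero.mpr hnm]
              simp [show ¬((h:Int) = -h) by omega]
            omega
      | some j =>
        show recursive_check_pairs_py (List.take j t ++ List.drop (j + 1) t) = true ↔ PairSpec (h :: t)
        obtain ⟨he, hm⟩ := findOppIdx_erase hf
        rw [he]
        have hlen : (t.erase (-h)).length ≤ n := by
          rw [List.length_erase_of_mem hm]
          simp at hl; omega
        exact (ih _ hlen).trans (pairSpec_cons hm).symm

lemma portB_iff (l : List Int) : recursive_check_pairs_py_alt l = true ↔ PairSpec l := by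
  unfold recursive_check_pairs_py_alt
  rw [PySem.Dict.foldl_insert_getD_add_one_eq_counter]
  simp only [PySem.Dict.getD_counter, PySem.Dict.items_counter]
  have hmod : PySem.Int.mod ((l.count 0 : Nat) : Int) 2 = 0 ↔ 2 ∣ l.count 0 := by
    rw [PySem.Int.mod_eq_zero_iff_dvd]
    exact_mod_cast Int.natCast_dvd_natCast (m := 2)
  constructor
  · intro h
    by_cases hz : PySem.Int.mod ((l.count 0 : Nat) : Int) 2 ≠ 0
    · rw [if_pos hz] at h; simp at h
    · rw [if_neg hz] at h
      rw [not_not] at hz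
      simp only [List.all_eq_true, List.mem_map, beq_iff_eq] at h
      refine ⟨fun x => ?_, hmod.mp hz⟩
      by_cases hx : x ∈ l
      · have hh := h (x, (l.count x : Int)) ⟨x, by simpa [PySem.Set.mem_ofList] using hx, rfl⟩
        have : (l.count (-x) : Int) = (l.count x : Int) := by simpa using hh
        omega
      · by_cases hx2 : -x ∈ l
        · have hh := h (-x, (l.count (-x) : Int)) ⟨-x, by simpa [PySem.Set.mem_ofList] using hx2, rfl⟩
          have h2 : (l.count (- -x) : Int) = (l.count (-x) : Int) := by simpa using hh
          have h3 : l.count x = 0 := List.count_eq_zero.mpr hx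
          simp at h2
          omega
        · rw [List.count_eq_zero.mpr hx, List.count_eq_zero.mpr hx2]
  · rintro ⟨hc, hz⟩
    rw [if_neg (not_ne_iff.mpr (hmod.mpr hz))]
    rw [List.all_eq_true]
    rintro ⟨k, c⟩ hkc
    simp only [List.mem_map] at hkc
    obtain ⟨k', _, hk'⟩ := hkc
    cases hk'
    simp only [beq_iff_eq]
    exact_mod_cast (hc k).symm

-- ===== VERDICT (by name: the statement is the Claim_ definition above) =====
theorem recursive_check_pairs_py_spec : Claim_equal_recursive_check_pairs_py := by
  intro l _
  unfold Spec_recursive_check_pairs_py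
  have hA := portA_iff_aux l.length l le_rfl
  have hB := portB_iff l
  cases h1 : recursive_check_pairs_py l <;> cases h2 : recursive_check_pairs_py_alt l <;>
    simp_all
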